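-- pv_equiv track=rewrite | github.com/newportg/POC-Thunderball | src/thunderball_predictor/methods.py | _numbers_from_start_and_signature
-- ===== SOURCE A (Python) =====
-- def _numbers_from_start_and_signature(
--     start: int,
--     signature: tuple[int, int, int, int, int],
-- ) -> tuple[int, ...] | None:
--     current = int(start)
--     numbers = [current]
--     for delta in signature[:-1]:
--         current = ((current - 1 + int(delta)) % 39) + 1
--         numbers.append(current)
--
--     if len(set(numbers)) != 5:
--         return None
--
--     return tuple(sorted(numbers))
-- ===== SOURCE B (Python) =====
-- def _numbers_from_start_and_signature(
--     start: int,
--     signature: tuple[int, int, int, int, int],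
-- ) -> tuple[int, ...] | None:
--     # prefix sums of the first four deltas, then each number independently in closed form
--     base = int(start) - 1
--     deltas = [int(d) for d in signature[:-1]]
--     sums = [sum(deltas[: i + 1]) for i in range(4)]
--     numbers = [int(start)] + [(base + s) % 39 + 1 for s in sums]
--     if len(set(numbers)) != 5:
--         return None
--     return tuple(sorted(numbers))
-- ===== Notes on version B (the rewrite author's own statement) =====
-- stated objective: alternative
-- what changed: B replaces A's running-accumulator recurrence (each number derived from the previous one) by a prefix-sum table of the deltas plus an independent closed-form (start-1+sum)%39+1 for each number, exploiting that modular steps compose.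
import Mathlib
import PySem

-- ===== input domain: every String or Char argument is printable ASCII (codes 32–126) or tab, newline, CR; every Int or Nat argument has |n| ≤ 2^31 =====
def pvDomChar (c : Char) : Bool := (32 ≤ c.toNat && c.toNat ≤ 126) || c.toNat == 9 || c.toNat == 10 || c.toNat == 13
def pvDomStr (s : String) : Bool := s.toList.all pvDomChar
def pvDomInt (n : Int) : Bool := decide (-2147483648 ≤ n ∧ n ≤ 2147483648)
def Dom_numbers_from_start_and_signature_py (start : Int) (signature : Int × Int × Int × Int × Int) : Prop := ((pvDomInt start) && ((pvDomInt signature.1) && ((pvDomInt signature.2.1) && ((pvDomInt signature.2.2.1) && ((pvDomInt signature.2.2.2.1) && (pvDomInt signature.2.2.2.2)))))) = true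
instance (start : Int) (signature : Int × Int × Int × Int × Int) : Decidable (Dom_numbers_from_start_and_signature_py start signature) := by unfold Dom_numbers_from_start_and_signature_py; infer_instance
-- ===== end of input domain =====

-- B replaces the running-accumulator recurrence by prefix sums of the deltas plus an independent closed form per number (alternative decomposition, same cost).


-- ===== PORT A =====
def numbers_from_start_and_signature_py (start : Int) (signature : Int × Int × Int × Int × Int) : Option (List Int) :=
  -- current = int(start); numbers = [current]; for delta in signature[:-1]: ...
  let res := [signature.1, signature.2.1, signature.2.2.1, signature.2.2.2.1].foldl
    (fun (st : Int × List Int) delta =>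
      let current := PySem.Int.mod (st.1 - 1 + delta) 39 + 1
      (current, st.2 ++ [current]))
    (start, [start])
  let numbers := res.2
  if PySem.Set.len (PySem.Set.ofList numbers) ≠ 5 then none
  else some (PySem.List.sorted numbers (fun x => x) false)

-- ===== PORT B =====
def numbers_from_start_and_signature_py_alt (start : Int) (signature : Int × Int × Int × Int × Int) : Option (List Int) :=
  -- prefix sums of the first four deltas, then each number independently in closed form
  let base := start - 1
  let deltas := [signature.1, signature.2.1, signature.2.2.1, signature.2.2.2.1]
  let sums := (List.range 4).map (fun i => (deltas.take (i + 1)).sum)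
  let numbers := start :: sums.map (fun s => PySem.Int.mod (base + s) 39 + 1)
  if PySem.Set.len (PySem.Set.ofList numbers) ≠ 5 then none
  else some (PySem.List.sorted numbers (fun x => x) false)

-- ===== PRECONDITION & SPEC =====
def Spec_numbers_from_start_and_signature_py (start : Int) (signature : Int × Int × Int × Int × Int) (out : Option (List Int)) : Prop := out = numbers_from_start_and_signature_py_alt start signature
instance (start : Int) (signature : Int × Int × Int × Int × Int) (out : Option (List Int)) : Decidable (Spec_numbers_from_start_and_signature_py start signature out) := by unfold Spec_numbers_from_start_and_signature_py; infer_instance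

-- ===== CLAIM (what is proved, stated in full; the proofs are below) =====
def Claim_equal_numbers_from_start_and_signature_py : Prop := ∀ (start : Int) (signature : Int × Int × Int × Int × Int), Dom_numbers_from_start_and_signature_py start signature → Spec_numbers_from_start_and_signature_py start signature (numbers_from_start_and_signature_py start signature)

-- ===== LEMMAS AND PROOFS =====

-- ===== VERDICT (by name: the statement is the Claim_ definition above) =====
lemma pv_lists_eq (start d1 d2 d3 d4 : Int) :
    ([d1, d2, d3, d4].foldl
      (fun (st : Int × List Int) delta =>
        let current := PySem.Int.mod (st.1 - 1 + delta) 39 + 1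
        (current, st.2 ++ [current]))
      (start, [start])).2
    = start :: ((List.range 4).map (fun i => (([d1, d2, d3, d4].take (i + 1)).sum))).map
        (fun s => PySem.Int.mod (start - 1 + s) 39 + 1) := by
  simp [List.foldl, List.range_succ, PySem.Int.mod]
  refine ⟨?_, ?_, ?_⟩ <;> ring_nf

theorem numbers_from_start_and_signature_py_spec : Claim_equal_numbers_from_start_and_signature_py := by
  intro start sig _
  unfold Spec_numbers_from_start_and_signature_py
  simp only [numbers_from_start_and_signature_py, numbers_from_start_and_signature_py_alt,
    pv_lists_eq]
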